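-- pv_equiv track=rewrite | github.com/HansjoergW/sec-fincancial-statement-data-set | secfsdstools/c_automation/task_framework.py | _star_position_from_end
-- ===== SOURCE A (Python) =====
-- def _star_position_from_end(path: str) -> int:
--     """
--     Gets the position of the "*" in the provided path (counted from the end).
--
--     Examples:
--         path = "a/b/c/d/*" -> returns 0
--         path = "a/b/c/*/d" -> returns 1
--         path = "a/b/*/c/d" -> returns 2
--
--     Args:
--         path: path with a "*" as part
--
--     Returns:
--         the position of the "*" in the path, counted from the end.
--     """
--
--     # ignore first and last /
--     if path.startswith('/'):
--         path = path[1:]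
--     if path.endswith('/'):
--         path = path[:-1]
--
--     # Split the string by '/' to get segments
--     segments = path.split('/')
--
--     # Iterate from the end and find the first segment containing '*'
--     for i, segment in enumerate(reversed(segments)):
--         if '*' in segment:
--             return i  # Position from the end
--
--     # If no '*' is found, return -1 to indicate an error
--     return -1
-- ===== SOURCE B (Python) =====
-- def _star_position_from_end(path: str) -> int:
--     # Locate the last '*' directly; the answer is the number of '/' separators
--     # strictly after it, ignoring one trailing '/'.  (A leading '/' never
--     # affects that count, so only the trailing strip is mirrored.)
--     idx = path.rfind('*')
--     if idx == -1:
--         return -1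
--     end = len(path) - 1 if path.endswith('/') else len(path)
--     return path.count('/', idx, end)
-- ===== Notes on version B (the rewrite author's own statement) =====
-- stated objective: simpler
-- what changed: B drops the strip+split+reversed-enumerate pipeline entirely: it locates the last '*' with rfind and returns the number of '/' separators after it (count with start/end bounds), never building a segment list.
import Mathlib
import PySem

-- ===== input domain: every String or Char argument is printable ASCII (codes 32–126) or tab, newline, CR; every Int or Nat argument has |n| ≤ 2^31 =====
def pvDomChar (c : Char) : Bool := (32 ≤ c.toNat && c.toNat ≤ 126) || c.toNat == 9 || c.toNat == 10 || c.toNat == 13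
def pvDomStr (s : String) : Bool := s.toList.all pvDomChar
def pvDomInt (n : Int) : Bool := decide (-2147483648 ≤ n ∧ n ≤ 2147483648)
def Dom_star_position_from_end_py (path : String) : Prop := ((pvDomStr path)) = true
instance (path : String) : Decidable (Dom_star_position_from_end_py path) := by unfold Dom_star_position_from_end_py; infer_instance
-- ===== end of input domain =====

-- B replaces A's strip + split-into-segments + reversed-enumerate loop by locating the last '*' and counting the '/' separators after it (simpler, same cost).


-- ===== PORT A =====
-- the leading single-'/' strip, then the trailing one
def strip1 (cs : List Char) : List Char :=
  if PySem.Chars.startswith cs ['/'] then PySem.List.slice cs (some 1) none else cs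

def stripA (cs : List Char) : List Char :=
  if PySem.Chars.endswith (strip1 cs) ['/'] then PySem.List.slice (strip1 cs) none (some (-1)) else strip1 cs

-- the 'for i, segment in enumerate(reversed(segments)): if '*' in segment: return i' loop
def aFind : List (Int × List Char) → Int
  | [] => -1
  | (i, seg) :: rest => if PySem.Chars.isIn ['*'] seg then i else aFind rest

def star_position_from_end_py (path : String) : Int :=
  aFind (PySem.List.enumerate (PySem.Chars.splitOn (stripA path.toList) ['/']).reverse)

-- ===== PORT B =====
-- path.rfind('*'): index of the last '*', -1 if absent (ported by hand, exact for a single-char needle)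
def bRfind : List Char → Int
  | [] => -1
  | c :: rest =>
    let r := bRfind rest
    if 0 ≤ r then r + 1 else if c = '*' then 0 else -1

def star_position_from_end_py_alt (path : String) : Int :=
  let idx := bRfind path.toList
  if idx = -1 then -1
  else
    let e : Int := if PySem.Chars.endswith path.toList ['/'] then PySem.Str.len path - 1 else PySem.Str.len path
    -- path.count('/', idx, e): a single-char needle, so it counts the '/' chars in the slice path[idx:e] (exact)
    ((PySem.List.slice path.toList (some idx) (some e)).count '/' : Int)

-- ===== PRECONDITION & SPEC =====
def Spec_star_position_from_end_py (path : String) (out : Int) : Prop := out = star_position_from_end_py_alt path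
instance (path : String) (out : Int) : Decidable (Spec_star_position_from_end_py path out) := by unfold Spec_star_position_from_end_py; infer_instance

-- ===== CLAIM (what is proved, stated in full; the proofs are below) =====
def Claim_equal_star_position_from_end_py : Prop := ∀ (path : String), Dom_star_position_from_end_py path → Spec_star_position_from_end_py path (star_position_from_end_py path)

-- ===== LEMMAS AND PROOFS =====

-- proof-side model of A after the strip: reverse char scan counting '/' before the first '*'
def bScan : List Char → Int → Int
  | [], _ => -1
  | c :: rest, cnt => if c = '*' then cnt else if c = '/' then bScan rest (cnt + 1) else bScan rest cnt

-- structural single-char split on '/' (proof-side model of Python's path.split('/'))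
def glue (c : Char) : List (List Char) → List (List Char)
  | [] => [[c]]
  | h :: t => (c :: h) :: t

def splitC : List Char → List (List Char)
  | [] => [[]]
  | c :: rest => if c = '/' then [] :: splitC rest else glue c (splitC rest)

def glueLast (c : Char) : List (List Char) → List (List Char)
  | [] => [[c]]
  | [h] => [h ++ [c]]
  | h :: t => h :: glueLast c t

def prepSeg (x : List Char) : List (List Char) → List (List Char)
  | [] => [x]
  | h :: t => (x ++ h) :: t

def aLoop : Int → List (List Char) → Int
  | _, [] => -1
  | k, seg :: rest => if '*' ∈ seg then k else aLoop (k + 1) rest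

theorem splitC_ne_nil (l : List Char) : splitC l ≠ [] := by
  cases l with
  | nil => simp [splitC]
  | cons c rest =>
    simp only [splitC]
    split
    · simp
    · cases h : splitC rest <;> simp [glue]

theorem glueLast_append (c : Char) (xs : List (List Char)) (y : List Char) :
    glueLast c (xs ++ [y]) = xs ++ [y ++ [c]] := by
  induction xs with
  | nil => simp [glueLast]
  | cons a xs ih =>
    cases xs with
    | nil => simp [glueLast]
    | cons b xs' => simpa [glueLast] using ih

theorem glueLast_cons (c : Char) (h : List Char) (t : List (List Char)) (ht : t ≠ []) :
    glueLast c (h :: t) = h :: glueLast c t := by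
  cases t with
  | nil => exact absurd rfl ht
  | cons b t' => rfl

theorem prepSeg_nil (ls : List (List Char)) (h : ls ≠ []) : prepSeg [] ls = ls := by
  cases ls with
  | nil => exact absurd rfl h
  | cons a t => simp [prepSeg]

theorem glue_append_nil (x : Char) (ls : List (List Char)) (h : ls ≠ []) :
    glue x (ls ++ [[]]) = glue x ls ++ [[]] := by
  cases ls with
  | nil => exact absurd rfl h
  | cons a t => simp [glue]

theorem glue_glueLast (x c : Char) (ls : List (List Char)) (h : ls ≠ []) :
    glue x (glueLast c ls) = glueLast c (glue x ls) := by
  cases ls with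
  | nil => exact absurd rfl h
  | cons a t =>
    cases t with
    | nil => simp [glue, glueLast]
    | cons b t' => rfl

theorem splitC_append_singleton (xs : List Char) (c : Char) :
    splitC (xs ++ [c]) = if c = '/' then splitC xs ++ [[]] else glueLast c (splitC xs) := by
  induction xs with
  | nil =>
    simp only [List.nil_append, splitC]
    split <;> simp [glue, glueLast]
  | cons x xs ih =>
    simp only [List.cons_append, splitC, ih]
    by_cases hx : x = '/' <;> by_cases hc : c = '/' <;>
      simp [hx, hc, glueLast_cons c _ _ (splitC_ne_nil xs),
            glue_append_nil x _ (splitC_ne_nil xs), glue_glueLast x c _ (splitC_ne_nil xs)]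

theorem splitC_reverse (l : List Char) :
    splitC l.reverse = ((splitC l).map List.reverse).reverse := by
  induction l with
  | nil => simp [splitC]
  | cons c rest ih =>
    rw [List.reverse_cons, splitC_append_singleton]
    simp only [splitC]
    by_cases hc : c = '/'
    · simp [hc, ih]
    · obtain ⟨h, t, hht⟩ : ∃ h t, splitC rest = h :: t := by
        cases hsp : splitC rest with
        | nil => exact absurd hsp (splitC_ne_nil rest)
        | cons h t => exact ⟨h, t, rfl⟩
      simp only [hc, ih, hht, glue, List.map_cons, List.reverse_cons,
        glueLast_append]
      simp

theorem go_spec (fuel : Nat) (l cur : List Char) (acc : List (List Char)) (h : l.length < fuel) :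
    PySem.Chars.splitOn.go ['/'] fuel l cur acc = acc.reverse ++ prepSeg cur.reverse (splitC l) := by
  induction fuel generalizing l cur acc with
  | zero => omega
  | succ fuel ih =>
    cases l with
    | nil => simp [PySem.Chars.splitOn.go, splitC, prepSeg]
    | cons c rest =>
      have hlen : rest.length < fuel := by simpa using h
      by_cases hc : c = '/'
      · have : ['/'].isPrefixOf (c :: rest) = true := by simp [List.isPrefixOf, hc]
        simp only [PySem.Chars.splitOn.go, this, if_pos, List.length_singleton,
          List.drop_succ_cons, List.drop_zero]
        rw [ih rest [] (cur.reverse :: acc) hlen]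
        simp only [splitC, if_pos hc, prepSeg, List.reverse_cons, List.reverse_nil,
          List.nil_append, List.append_assoc, List.singleton_append]
        cases hsp : splitC rest with
        | nil => exact absurd hsp (splitC_ne_nil rest)
        | cons a t => simp
      · have : ['/'].isPrefixOf (c :: rest) = false := by
          simp [List.isPrefixOf]; exact fun hh => absurd hh.symm hc
        simp only [PySem.Chars.splitOn.go, this]
        rw [if_neg (by simp), ih rest (c :: cur) acc hlen]
        obtain ⟨hd, tl, hht⟩ : ∃ hd tl, splitC rest = hd :: tl := by
          cases hsp : splitC rest with
          | nil => exact absurd hsp (splitC_ne_nil rest)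
          | cons hd tl => exact ⟨hd, tl, rfl⟩
        simp [splitC, hc, hht, glue, prepSeg]

theorem splitOn_eq (cs : List Char) : PySem.Chars.splitOn cs ['/'] = splitC cs := by
  unfold PySem.Chars.splitOn
  rw [go_spec cs.length.succ cs [] [] (by omega)]
  simp [prepSeg_nil _ (splitC_ne_nil cs)]

theorem isIn_star (seg : List Char) : PySem.Chars.isIn ['*'] seg = true ↔ '*' ∈ seg := by
  rw [PySem.Chars.isIn_iff_infix]
  exact List.singleton_infix_iff '*' seg

theorem aFind_enumerate (l : List (List Char)) (k : Int) :
    aFind (PySem.List.enumerate l k) = aLoop k l := by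
  induction l generalizing k with
  | nil => simp [PySem.List.enumerate, aFind, aLoop]
  | cons seg rest ih =>
    rw [PySem.List.enumerate_cons]
    by_cases hm : '*' ∈ seg
    · simp [aFind, aLoop, hm, (isIn_star seg).mpr hm]
    · have : PySem.Chars.isIn ['*'] seg = false := by
        rcases Bool.eq_false_or_eq_true (PySem.Chars.isIn ['*'] seg) with ht | hf
        · exact absurd ((isIn_star seg).mp ht) hm
        · exact hf
      simp [aFind, aLoop, hm, this, ih]

theorem core (rs : List Char) (k : Int) :
    aLoop k ((splitC rs).map List.reverse) = bScan rs k := by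
  induction rs generalizing k with
  | nil => simp [splitC, aLoop, bScan]
  | cons c rest ih =>
    simp only [splitC, bScan]
    by_cases hc : c = '/'
    · have hcs : c ≠ '*' := by simp [hc]
      simp only [if_pos hc, List.map_cons, aLoop]
      simp [hc, ih]
    · obtain ⟨hd, tl, hht⟩ : ∃ hd tl, splitC rest = hd :: tl := by
        cases hsp : splitC rest with
        | nil => exact absurd hsp (splitC_ne_nil rest)
        | cons hd tl => exact ⟨hd, tl, rfl⟩
      by_cases hs : c = '*'
      · simp [hht, glue, aLoop, hs]
      · have ih' := ih k
        rw [hht] at ih'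
        simp only [if_neg hc, hht, glue, List.map_cons, aLoop] at *
        have hmem : '*' ∈ c :: hd ↔ '*' ∈ hd := by
          constructor
          · intro hh
            rcases List.mem_cons.mp hh with hh | hh
            · exact absurd hh.symm hs
            · exact hh
          · exact fun hh => List.mem_cons_of_mem _ hh
        by_cases hh : '*' ∈ hd
        · simp only [List.mem_reverse] at *
          simp [hs, hmem.mpr hh, hh] at ih' ⊢
          simpa [hh] using ih'
        · simp only [List.mem_reverse] at *
          simp [hs, (by simpa [hmem] using hh : ¬ '*' ∈ (c :: hd)), hh] at ih' ⊢
          simpa [hh] using ih'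

-- A (after the strip) computes the reverse scan bScan
theorem a_eq_bScan (cs : List Char) :
    aFind (PySem.List.enumerate (splitC cs).reverse) = bScan cs.reverse 0 := by
  have h1 : (splitC cs).reverse = (splitC cs.reverse).map List.reverse := by
    have h := splitC_reverse cs.reverse
    rw [List.reverse_reverse] at h
    rw [h, List.reverse_reverse]
  rw [aFind_enumerate, h1, core]

-- ===== bridge from bScan to B's rfind/count =====

theorem bScan_no_star (rs : List Char) (k : Int) (h : '*' ∉ rs) : bScan rs k = -1 := by
  induction rs generalizing k with
  | nil => rfl
  | cons c rest ih =>
    have hc : c ≠ '*' := fun hh => h (hh ▸ List.mem_cons_self)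
    have hr : '*' ∉ rest := fun hh => h (List.mem_cons_of_mem _ hh)
    simp only [bScan, if_neg hc]
    split <;> exact ih _ hr

theorem bScan_star (t u : List Char) (k : Int) (h : '*' ∉ t) :
    bScan (t ++ '*' :: u) k = k + (t.count '/' : Int) := by
  induction t generalizing k with
  | nil => simp [bScan]
  | cons c t ih =>
    have hc : c ≠ '*' := fun hh => h (hh ▸ List.mem_cons_self)
    have ht : '*' ∉ t := fun hh => h (List.mem_cons_of_mem _ hh)
    simp only [List.cons_append, bScan, if_neg hc]
    by_cases hsl : c = '/'
    · rw [if_pos hsl, ih _ ht]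
      simp [hsl]
      omega
    · rw [if_neg hsl, ih _ ht]
      simp [hsl]

theorem bRfind_no_star (cs : List Char) (h : '*' ∉ cs) : bRfind cs = -1 := by
  induction cs with
  | nil => rfl
  | cons c rest ih =>
    have hc : c ≠ '*' := fun hh => h (hh ▸ List.mem_cons_self)
    have hr := ih (fun hh => h (List.mem_cons_of_mem _ hh))
    simp [bRfind, hr, hc]

theorem bRfind_concat (xs s : List Char) (h : '*' ∉ s) :
    bRfind (xs ++ '*' :: s) = (xs.length : Int) := by
  induction xs with
  | nil => simp [bRfind, bRfind_no_star s h]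
  | cons x xs ih =>
    simp [bRfind, ih]

theorem decomp_last_star (cs : List Char) (h : '*' ∈ cs) :
    ∃ xs s, cs = xs ++ '*' :: s ∧ '*' ∉ s := by
  induction cs with
  | nil => cases h
  | cons c rest ih =>
    by_cases hr : '*' ∈ rest
    · obtain ⟨xs, s, he, hn⟩ := ih hr
      exact ⟨c :: xs, s, by simp [he], hn⟩
    · have hc : c = '*' := by
        rcases List.mem_cons.mp h with hh | hh
        · exact hh.symm
        · exact absurd hh hr
      exact ⟨[], rest, by simp [hc], hr⟩

theorem startswith_cons (x : Char) (l : List Char) (c : Char) :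
    PySem.Chars.startswith (x :: l) [c] = (x == c) := by
  by_cases h : x = c
  · subst h
    have hp : PySem.Chars.startswith (x :: l) [x] = true :=
      (PySem.Chars.startswith_iff _ _).mpr ⟨l, rfl⟩
    simp [hp]
  · have : ¬ PySem.Chars.startswith (x :: l) [c] = true := by
      intro hh
      have := (PySem.Chars.startswith_iff _ _).mp hh
      rw [List.cons_prefix_cons] at this
      exact h this.1.symm
    simp [Bool.eq_false_iff.mpr this, h]

theorem endswith_concat (l : List Char) (x : Char) (c : Char) :
    PySem.Chars.endswith (l ++ [x]) [c] = (x == c) := by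
  by_cases h : x = c
  · subst h
    have hp : PySem.Chars.endswith (l ++ [x]) [x] = true :=
      (PySem.Chars.endswith_iff _ _).mpr ⟨l, rfl⟩
    simp [hp]
  · have : ¬ PySem.Chars.endswith (l ++ [x]) [c] = true := by
      intro hh
      have hsuf := (PySem.Chars.endswith_iff _ _).mp hh
      have : [c].reverse <+: (l ++ [x]).reverse := List.reverse_prefix.mpr (by simpa using hsuf)
      rw [List.reverse_append] at this
      simp only [List.reverse_singleton, List.singleton_append] at this
      rw [List.cons_prefix_cons] at this
      exact h this.1.symm
    simp [Bool.eq_false_iff.mpr this, h]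

-- after the leading strip the tail after the last '*' is unchanged
theorem strip1_decomp (xs s : List Char) :
    ∃ xs1, strip1 (xs ++ '*' :: s) = xs1 ++ '*' :: s := by
  unfold strip1
  cases xs with
  | nil =>
    have h0 : PySem.Chars.startswith ([] ++ '*' :: s) ['/'] = false := by
      simpa using startswith_cons '*' s '/'
    exact ⟨[], by rw [h0]; simp⟩
  | cons x xs' =>
    by_cases hx : x = '/'
    · refine ⟨xs', ?_⟩
      rw [List.cons_append, startswith_cons, if_pos (by simp [hx]),
        PySem.List.slice_from _ (by omega : (0:Int) ≤ 1)]
      simp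
    · refine ⟨x :: xs', ?_⟩
      rw [List.cons_append, startswith_cons, if_neg (by simp [hx])]

-- the main bridge: bScan of the stripped path, reversed, equals B's rfind/count computation
theorem key (cs : List Char) :
    bScan (stripA cs).reverse 0 =
      (if bRfind cs = -1 then (-1 : Int)
       else ((PySem.List.slice cs (some (bRfind cs))
                (some (if PySem.Chars.endswith cs ['/']
                        then (cs.length : Int) - 1 else (cs.length : Int)))).count '/' : Int)) := by
  by_cases hmem : '*' ∈ cs
  · obtain ⟨xs, s, rfl, hns⟩ := decomp_last_star cs hmem
    have hidx : bRfind (xs ++ '*' :: s) = (xs.length : Int) := bRfind_concat xs s hns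
    rw [hidx, if_neg (by omega)]
    obtain ⟨xs1, h1⟩ := strip1_decomp xs s
    have hstrip : stripA (xs ++ '*' :: s) =
        if PySem.Chars.endswith (xs1 ++ '*' :: s) ['/']
        then PySem.List.slice (xs1 ++ '*' :: s) none (some (-1)) else (xs1 ++ '*' :: s) := by
      unfold stripA; rw [h1]
    rcases s.eq_nil_or_concat with rfl | ⟨s', c, rfl⟩
    · -- path ends with '*': no trailing strip on either side
      have he : PySem.Chars.endswith (xs1 ++ ['*']) ['/'] = false := by
        simpa using endswith_concat xs1 '*' '/'
      have he' : PySem.Chars.endswith (xs ++ ['*']) ['/'] = false := by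
        simpa using endswith_concat xs '*' '/'
      rw [hstrip]
      simp only [he, he', if_false, Bool.false_eq_true]
      have hlen : ((xs ++ ['*']).length : Int) = ((xs.length + 1 : Nat) : Int) := by simp
      rw [hlen, PySem.List.slice_natCast]
      have : bScan (xs1 ++ ['*']).reverse 0 = 0 := by
        rw [List.reverse_append]
        simpa using bScan_star [] xs1.reverse 0 (by simp)
      rw [this]
      rw [show ((xs ++ ['*']).drop xs.length) = ['*'] from by
        simpa using List.drop_left xs ['*']]
      simp
    · -- path ends with c; trailing strip iff c = '/'
      simp only [List.concat_eq_append] at hns hidx hstrip h1 ⊢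
      have hns' : '*' ∉ s' := fun hh => hns (List.mem_append.mpr (Or.inl hh))
      have hnc : c ≠ '*' := fun hh => hns (by simp [hh])
      have he : PySem.Chars.endswith (xs1 ++ '*' :: (s' ++ [c])) ['/'] = (c == '/') := by
        rw [show xs1 ++ '*' :: (s' ++ [c]) = (xs1 ++ '*' :: s') ++ [c] from by simp]
        exact endswith_concat _ c '/'
      have he' : PySem.Chars.endswith (xs ++ '*' :: (s' ++ [c])) ['/'] = (c == '/') := by
        rw [show xs ++ '*' :: (s' ++ [c]) = (xs ++ '*' :: s') ++ [c] from by simp]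
        exact endswith_concat _ c '/'
      rw [hstrip, he, he']
      by_cases hc : c = '/'
      · rw [if_pos (by simp [hc]), if_pos (by simp [hc])]
        rw [PySem.List.slice_to_neg_one]
        have hdl : (xs1 ++ '*' :: (s' ++ [c])).dropLast = xs1 ++ '*' :: s' := by
          rw [show xs1 ++ '*' :: (s' ++ [c]) = (xs1 ++ '*' :: s') ++ [c] from by simp,
            List.dropLast_concat]
        rw [hdl]
        have hL : ((xs ++ '*' :: (s' ++ [c])).length : Int) - 1
            = ((xs.length + s'.length + 1 : Nat) : Int) := by simp; push_cast; ring
        rw [hL, PySem.List.slice_natCast]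
        have hdrop : (xs ++ '*' :: (s' ++ [c])).drop xs.length = '*' :: (s' ++ [c]) :=
          by simpa using List.drop_left xs ('*' :: (s' ++ [c]))
        rw [hdrop]
        have htake : (('*' :: (s' ++ [c])).take (xs.length + s'.length + 1 - xs.length))
            = '*' :: s' := by
          rw [show xs.length + s'.length + 1 - xs.length = s'.length + 1 from by omega]
          simp [List.take_succ_cons, List.take_left]
        rw [htake]
        have hbs : bScan (xs1 ++ '*' :: s').reverse 0 = (s'.count '/' : Int) := by
          rw [List.reverse_append, List.reverse_cons]
          rw [show s'.reverse ++ [ '*' ] ++ xs1.reverse = s'.reverse ++ '*' :: xs1.reverse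
            from by simp]
          rw [bScan_star _ _ _ (fun hh => hns' (List.mem_reverse.mp hh))]
          simp
        rw [hbs]
        simp [List.count_cons, hnc]
      · rw [if_neg (by simp [hc]), if_neg (by simp [hc])]
        have hL : ((xs ++ '*' :: (s' ++ [c])).length : Int)
            = ((xs.length + s'.length + 2 : Nat) : Int) := by simp; push_cast; ring
        rw [hL, PySem.List.slice_natCast]
        have hdrop : (xs ++ '*' :: (s' ++ [c])).drop xs.length = '*' :: (s' ++ [c]) :=
          by simpa using List.drop_left xs ('*' :: (s' ++ [c]))
        rw [hdrop]
        have htake : (('*' :: (s' ++ [c])).take (xs.length + s'.length + 2 - xs.length))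
            = '*' :: (s' ++ [c]) := by
          apply List.take_of_length_le
          simp; omega
        rw [htake]
        have hbs : bScan (xs1 ++ '*' :: (s' ++ [c])).reverse 0
            = (((s' ++ [c]).count '/' : Nat) : Int) := by
          rw [List.reverse_append, List.reverse_cons]
          rw [show (s' ++ [c]).reverse ++ [ '*' ] ++ xs1.reverse
              = (s' ++ [c]).reverse ++ '*' :: xs1.reverse from by simp]
          rw [bScan_star _ _ _ (fun hh => hns (List.mem_reverse.mp hh))]
          simp [hc, List.count_cons_of_ne, List.count_reverse]
        rw [hbs]
        simp [hc, List.count_cons_of_ne]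
  · -- no '*': both return -1
    have hb := bRfind_no_star cs hmem
    rw [hb, if_pos rfl]
    have hs1 : ∀ x : Char, x ∈ strip1 cs → x ∈ cs := by
      intro x hx
      unfold strip1 at hx
      split at hx
      · exact PySem.List.mem_of_mem_slice _ _ _ hx
      · exact hx
    have hsub : '*' ∉ stripA cs := by
      intro hh
      apply hmem
      unfold stripA at hh
      split at hh
      · exact hs1 _ (PySem.List.mem_of_mem_slice _ _ _ hh)
      · exact hs1 _ hh
    exact bScan_no_star _ 0 (by simpa using hsub)

-- ===== VERDICT (by name: the statement is the Claim_ definition above) =====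
theorem star_position_from_end_py_spec : Claim_equal_star_position_from_end_py := by
  intro path _
  unfold Spec_star_position_from_end_py star_position_from_end_py star_position_from_end_py_alt
  rw [splitOn_eq, a_eq_bScan, key]
  simp [PySem.Str.len_eq]
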